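-- pv_equiv track=rewrite | github.com/AdarshVardan/Daily-Programming-Challenge-2024 | Day4.py | swap_sort
-- ===== SOURCE A (Python) =====
-- def swap_sort(array1,array2):
--     m,n=len(array1),len(array2)
--     p1,p2=m-1,0
--
--     while p1>=0 and p2<n:
--         if array1[p1]>array2[p2]:
--             array1[p1],array2[p2]=array2[p2],array1[p1]
--             p1-=1
--             p2+=1
--         else:
--             break
--     array1.sort()
--     array2.sort()
--     return array1,array2
-- ===== SOURCE B (Python) =====
-- def swap_sort(array1, array2):
--     def exchange(xs, ys):
--         # peel one (last of xs, first of ys) pair per call while they are out of order;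
--         # returns the final (unsorted) contents of the two arrays
--         if xs and ys and xs[-1] > ys[0]:
--             r1, r2 = exchange(xs[:-1], ys[1:])
--             return r1 + [ys[0]], r2 + [xs[-1]]
--         return xs, ys
--     r1, r2 = exchange(array1, array2)
--     array1[:] = sorted(r1)
--     array2[:] = sorted(r2)
--     return array1, array2
-- ===== Notes on version B (the rewrite author's own statement) =====
-- stated objective: alternative
-- what changed: A runs an index-based two-pointer while loop that swaps elements of the two lists in place before sorting; B is a structural recursion that peels one (last-of-array1, head-of-array2) pair per call while they are out of order and rebuilds both final lists functionally, then sorts and writes them back.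
import Mathlib
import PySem

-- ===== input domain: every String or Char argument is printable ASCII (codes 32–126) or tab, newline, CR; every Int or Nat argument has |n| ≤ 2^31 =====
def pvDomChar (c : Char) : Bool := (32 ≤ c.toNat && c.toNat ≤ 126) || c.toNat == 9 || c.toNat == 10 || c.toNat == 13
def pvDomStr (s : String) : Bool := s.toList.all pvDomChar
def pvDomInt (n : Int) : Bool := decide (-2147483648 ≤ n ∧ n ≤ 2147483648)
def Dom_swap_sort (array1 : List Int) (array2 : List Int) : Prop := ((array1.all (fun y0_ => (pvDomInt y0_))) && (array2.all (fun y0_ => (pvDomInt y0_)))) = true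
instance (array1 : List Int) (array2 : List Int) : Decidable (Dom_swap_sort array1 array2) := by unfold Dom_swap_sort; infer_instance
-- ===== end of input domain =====

-- B replaces A's index-based two-pointer swap loop by a structural recursion that
-- peels one (last-of-array1, head-of-array2) pair per call and rebuilds both lists,
-- then sorts (objective: alternative decomposition). Both Pythons mutate the argument
-- lists to the same final contents; the equivalence proved here is about the return value.

-- ===== PORT A =====
-- A's while loop; indices are guarded (0 ≤ p1, p2 < len) and p1 < len array1, 0 ≤ p2
-- on every reachable state, so getD 0 / .toNat are exact there.
def swapLoopA (a1 a2 : List Int) (p1 p2 : Int) : List Int × List Int :=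
  if h : 0 ≤ p1 ∧ p2 < (a2.length : Int) then
    let x := a1.getD p1.toNat 0
    let y := a2.getD p2.toNat 0
    if x > y then
      swapLoopA (a1.set p1.toNat y) (a2.set p2.toNat x) (p1 - 1) (p2 + 1)
    else (a1, a2)
  else (a1, a2)
termination_by (p1 + 1).toNat
decreasing_by omega

def swap_sort (array1 : List Int) (array2 : List Int) : List Int × List Int :=
  let r := swapLoopA array1 array2 ((array1.length : Int) - 1) 0
  (PySem.List.sorted r.1 (fun x => x) false, PySem.List.sorted r.2 (fun x => x) false)

-- ===== PORT B =====
-- B's recursive `exchange`: xs[-1] = getLastD (guarded by xs ≠ []), ys[0] = headD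
-- (guarded by ys ≠ []), xs[:-1] = dropLast, ys[1:] = tail — exact under the guards.
def goB (xs ys : List Int) : List Int × List Int :=
  if h : xs ≠ [] ∧ ys ≠ [] ∧ xs.getLastD 0 > ys.headD 0 then
    let r := goB xs.dropLast ys.tail
    (r.1 ++ [ys.headD 0], r.2 ++ [xs.getLastD 0])
  else (xs, ys)
termination_by xs.length
decreasing_by
  have : xs ≠ [] := h.1
  simp [List.length_dropLast]
  exact List.length_pos_iff.mpr this

def swap_sort_alt (array1 : List Int) (array2 : List Int) : List Int × List Int :=
  let r := goB array1 array2
  (PySem.List.sorted r.1 (fun x => x) false, PySem.List.sorted r.2 (fun x => x) false)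

-- ===== PRECONDITION & SPEC =====
def Spec_swap_sort (array1 : List Int) (array2 : List Int) (out : List Int × List Int) : Prop := out = swap_sort_alt array1 array2
instance (array1 : List Int) (array2 : List Int) (out : List Int × List Int) : Decidable (Spec_swap_sort array1 array2 out) := by unfold Spec_swap_sort; infer_instance

-- ===== CLAIM (what is proved, stated in full; the proofs are below) =====
def Claim_equal_swap_sort : Prop := ∀ (array1 : List Int) (array2 : List Int), Dom_swap_sort array1 array2 → Spec_swap_sort array1 array2 (swap_sort array1 array2)

-- ===== LEMMAS AND PROOFS =====

-- proof-side counter: the number of pairs A's loop swaps (= the recursion depth of goB)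
def countK (a1 a2 : List Int) (k : Nat) : Nat :=
  if h : k < a1.length ∧ k < a2.length ∧ a1.getD (a1.length - 1 - k) 0 > a2.getD k 0 then
    countK a1 a2 (k + 1)
  else k
termination_by a1.length - k

lemma set_take_last (l : List Int) (i : Nat) (y : Int) (h : i < l.length) :
    (l.take (i + 1)).set i y = l.take i ++ [y] := by
  apply List.ext_getElem
  · simp; omega
  · intro j h1 h2
    by_cases hj : j = i
    · subst hj
      simp [Nat.le_of_lt h]
    · have hji : j < i := by simp at h1; omega
      have hjl : j < l.length := by omega
      simp [List.getElem_set, hji, hjl]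
      omega

lemma loop_char_fuel (o1 o2 : List Int) :
    ∀ fuel k, o1.length - k ≤ fuel → k ≤ o1.length → k ≤ o2.length →
    swapLoopA (o1.take (o1.length - k) ++ (o2.take k).reverse)
              ((o1.drop (o1.length - k)).reverse ++ o2.drop k)
              ((o1.length : Int) - k - 1) (k : Int)
    = (o1.take (o1.length - countK o1 o2 k) ++ (o2.take (countK o1 o2 k)).reverse,
       (o1.drop (o1.length - countK o1 o2 k)).reverse ++ o2.drop (countK o1 o2 k)) := by
  intro fuel
  induction fuel with
  | zero =>
    intro k hf hk1 hk2
    have hm : o1.length = k := by omega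
    rw [swapLoopA, countK, dif_neg (by omega), dif_neg (by omega)]
  | succ fuel ih =>
    intro k hf hk1 hk2
    by_cases hcm : k < o1.length
    · by_cases hcn : k < o2.length
      · -- both bounds hold; the loop guard is true
        have hlen2 : ((o1.drop (o1.length - k)).reverse ++ o2.drop k).length = o2.length := by
          simp; omega
        have htn : ((o1.length : Int) - k - 1).toNat = o1.length - 1 - k := by omega
        have hx : (o1.take (o1.length - k) ++ (o2.take k).reverse).getD
            ((o1.length : Int) - k - 1).toNat 0 = o1.getD (o1.length - 1 - k) 0 := by
          rw [htn]
          have h1 : o1.length - 1 - k < (o1.take (o1.length - k)).length := by simp; omega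
          simp only [List.getD]
          rw [List.getElem?_append_left h1, List.getElem?_take, if_pos (by omega)]
        have hy : ((o1.drop (o1.length - k)).reverse ++ o2.drop k).getD
            ((k : Int)).toNat 0 = o2.getD k 0 := by
          have h1 : ((o1.drop (o1.length - k)).reverse).length = k := by simp; omega
          simp only [List.getD]
          rw [List.getElem?_append_right (by omega), h1]
          simp [List.getElem?_drop]
        rw [swapLoopA, countK, dif_pos (by constructor <;> [omega; (rw [hlen2]; omega)])]
        simp only [hx, hy]
        by_cases hgt : o1.getD (o1.length - 1 - k) 0 > o2.getD k 0
        · rw [if_pos hgt, dif_pos ⟨hcm, hcn, hgt⟩]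
          -- the recursive call's state is the (k+1) state
          have e1 : (o1.take (o1.length - k) ++ (o2.take k).reverse).set
              ((o1.length : Int) - k - 1).toNat (o2.getD k 0)
              = o1.take (o1.length - (k + 1)) ++ (o2.take (k + 1)).reverse := by
            rw [htn]
            have hsplit : o1.length - k = (o1.length - 1 - k) + 1 := by omega
            have hlt : o1.length - 1 - k < (o1.take (o1.length - k)).length := by simp; omega
            rw [List.set_append_left _ _ hlt, hsplit,
              set_take_last o1 (o1.length - 1 - k) _ (by omega)]
            have ht2 : o2.take (k + 1) = o2.take k ++ [o2[k]'hcn] := by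
              rw [List.take_add_one, List.getElem?_eq_getElem hcn]; rfl
            have hgd : o2.getD k 0 = o2[k]'hcn := by
              simp [List.getD, List.getElem?_eq_getElem hcn]
            have hmm : o1.length - (k + 1) = o1.length - 1 - k := by omega
            rw [ht2, hgd, hmm, List.reverse_append]
            simp only [List.reverse_singleton, List.singleton_append, List.append_assoc]
          have e2 : ((o1.drop (o1.length - k)).reverse ++ o2.drop k).set
              ((k : Int)).toNat (o1.getD (o1.length - 1 - k) 0)
              = (o1.drop (o1.length - (k + 1))).reverse ++ o2.drop (k + 1) := by
            have h1 : ((o1.drop (o1.length - k)).reverse).length = k := by simp; omega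
            have hm1 : o1.length - 1 - k < o1.length := by omega
            have hd1 : o1.drop (o1.length - (k + 1)) = o1[o1.length - 1 - k]'hm1 :: o1.drop (o1.length - k) := by
              have h3 : o1.length - (k + 1) = o1.length - 1 - k := by omega
              have h4 : o1.length - k = (o1.length - 1 - k) + 1 := by omega
              rw [h3, h4, List.getElem_cons_drop]
            have hd2 : o2.drop k = o2[k]'hcn :: o2.drop (k + 1) :=
              (List.getElem_cons_drop hcn).symm
            have hga : o1.getD (o1.length - 1 - k) 0 = o1[o1.length - 1 - k]'hm1 := by
              simp [List.getD, List.getElem?_eq_getElem hm1]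
            rw [Int.toNat_natCast, List.set_append_right _ _ (by omega), h1, Nat.sub_self,
              hd2, List.set_cons_zero, hd1, hga]
            simp
          rw [e1, e2]
          have ep1 : (o1.length : Int) - k - 1 - 1 = (o1.length : Int) - (k + 1 : Nat) - 1 := by
            push_cast; ring
          have ep2 : (k : Int) + 1 = ((k + 1 : Nat) : Int) := by push_cast; ring
          rw [ep1, ep2]
          exact ih (k + 1) (by omega) (by omega) (by omega)
        · rw [if_neg hgt, dif_neg (by intro h; exact hgt h.2.2)]
      · rw [swapLoopA, countK]
        have hlen2 : ((o1.drop (o1.length - k)).reverse ++ o2.drop k).length = o2.length := by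
          simp; omega
        rw [dif_neg (by rw [hlen2]; omega), dif_neg (by omega)]
    · rw [swapLoopA, countK, dif_neg (by omega), dif_neg (by omega)]

lemma countK_shift (xs ys : List Int) :
    ∀ fuel j, xs.length - j ≤ fuel →
    countK xs.dropLast ys.tail j + 1 = countK xs ys (j + 1) := by
  intro fuel
  induction fuel with
  | zero =>
    intro j hf
    have h1 : ¬ (j < xs.dropLast.length ∧ j < ys.tail.length ∧
        xs.dropLast.getD (xs.dropLast.length - 1 - j) 0 > ys.tail.getD j 0) := by
      intro h
      have := h.1
      simp only [List.length_dropLast] at this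
      omega
    have h2 : ¬ (j + 1 < xs.length ∧ j + 1 < ys.length ∧
        xs.getD (xs.length - 1 - (j + 1)) 0 > ys.getD (j + 1) 0) := by
      intro h
      have := h.1
      omega
    conv_lhs => rw [countK, dif_neg h1]
    conv_rhs => rw [countK, dif_neg h2]
  | succ fuel ih =>
    intro j hf
    have hglt : j < xs.dropLast.length → (xs.dropLast.getD (xs.dropLast.length - 1 - j) 0
        = xs.getD (xs.length - 1 - (j + 1)) 0) := by
      intro h1
      simp only [List.length_dropLast] at h1
      simp only [List.getD, List.getElem?_dropLast, List.length_dropLast]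
      rw [if_pos (by omega)]
      have he : xs.length - 1 - 1 - j = xs.length - 1 - (j + 1) := by omega
      rw [he]
    have hgtl : ys.tail.getD j 0 = ys.getD (j + 1) 0 := by
      simp [List.getD, List.getElem?_tail]
    by_cases hg : j + 1 < xs.length ∧ j + 1 < ys.length ∧
        xs.getD (xs.length - 1 - (j + 1)) 0 > ys.getD (j + 1) 0
    · have hg' : j < xs.dropLast.length ∧ j < ys.tail.length ∧
          xs.dropLast.getD (xs.dropLast.length - 1 - j) 0 > ys.tail.getD j 0 := by
        have hj1 : j < xs.dropLast.length := by simp only [List.length_dropLast]; omega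
        refine ⟨hj1, by simp only [List.length_tail]; omega, ?_⟩
        rw [hglt hj1, hgtl]; exact hg.2.2
      conv_lhs => rw [countK, dif_pos hg']
      conv_rhs => rw [countK, dif_pos hg]
      have hj : j + 1 < xs.length := hg.1
      exact ih (j + 1) (by omega)
    · have hg' : ¬ (j < xs.dropLast.length ∧ j < ys.tail.length ∧
          xs.dropLast.getD (xs.dropLast.length - 1 - j) 0 > ys.tail.getD j 0) := by
        intro h
        apply hg
        have hj1 := h.1
        have hj2 := h.2.1
        simp only [List.length_dropLast] at hj1
        simp only [List.length_tail] at hj2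
        refine ⟨by omega, by omega, ?_⟩
        rw [← hglt h.1, ← hgtl]; exact h.2.2
      conv_lhs => rw [countK, dif_neg hg']
      conv_rhs => rw [countK, dif_neg hg]

lemma dropLast_append_getLastD (xs : List Int) (h : xs ≠ []) :
    xs.dropLast ++ [xs.getLastD 0] = xs := by
  induction xs with
  | nil => exact absurd rfl h
  | cons a t ih =>
    cases t with
    | nil => rfl
    | cons b u =>
      have := ih (by simp)
      simpa using this

lemma getD_last_eq (xs : List Int) : xs.getD (xs.length - 1) 0 = xs.getLastD 0 := by
  rw [List.getLastD_eq_getLast?, List.getLast?_eq_getElem?]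
  rfl

lemma getD_head_eq (ys : List Int) : ys.getD 0 0 = ys.headD 0 := by
  cases ys <;> rfl

lemma goB_char : ∀ (fuel : Nat) (xs ys : List Int), xs.length ≤ fuel →
    goB xs ys = (xs.take (xs.length - countK xs ys 0) ++ (ys.take (countK xs ys 0)).reverse,
                 ys.drop (countK xs ys 0) ++ xs.drop (xs.length - countK xs ys 0)) := by
  intro fuel
  induction fuel with
  | zero =>
    intro xs ys hf
    have hx : xs = [] := List.eq_nil_of_length_eq_zero (by omega)
    subst hx
    rw [goB, dif_neg (by simp), countK, dif_neg (by simp)]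
    simp
  | succ fuel ih =>
    intro xs ys hf
    by_cases hg : xs ≠ [] ∧ ys ≠ [] ∧ xs.getLastD 0 > ys.headD 0
    · have hm : 0 < xs.length := List.length_pos_iff.mpr hg.1
      have hn : 0 < ys.length := List.length_pos_iff.mpr hg.2.1
      have h0 : 0 < xs.length ∧ 0 < ys.length ∧
          xs.getD (xs.length - 1 - 0) 0 > ys.getD 0 0 := by
        refine ⟨hm, hn, ?_⟩
        rw [show xs.length - 1 - 0 = xs.length - 1 from rfl, getD_last_eq, getD_head_eq]
        exact hg.2.2
      have hK : countK xs ys 0 = countK xs.dropLast ys.tail 0 + 1 := by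
        conv_lhs => rw [countK, dif_pos h0]
        exact (countK_shift xs ys xs.length 0 (by omega)).symm
      obtain ⟨yh, yt, hys⟩ : ∃ a t, ys = a :: t := by
        cases ys with
        | nil => exact absurd rfl hg.2.1
        | cons a t => exact ⟨a, t, rfl⟩
      subst hys
      rw [goB, dif_pos hg, ih xs.dropLast (yh :: yt).tail (by simp [List.length_dropLast]; omega), hK]
      set K' := countK xs.dropLast (yh :: yt).tail 0 with hKdef
      have ea : xs.dropLast.take (xs.dropLast.length - K') = xs.take (xs.length - (K' + 1)) := by
        rw [List.dropLast_eq_take, List.take_take]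
        congr 1
        simp only [List.length_take]
        omega
      have eb : ((yh :: yt).tail.take K').reverse ++ [(yh :: yt).headD 0]
          = ((yh :: yt).take (K' + 1)).reverse := by
        simp [List.take_succ_cons]
      have ec : (yh :: yt).tail.drop K' = (yh :: yt).drop (K' + 1) := by simp
      have ed : xs.dropLast.drop (xs.dropLast.length - K') ++ [xs.getLastD 0]
          = xs.drop (xs.length - (K' + 1)) := by
        have hi : xs.length - (K' + 1) = xs.dropLast.length - K' := by
          simp only [List.length_dropLast]
          omega
        rw [hi]
        set n := xs.dropLast.length - K' with hn'
        conv_rhs => rw [← dropLast_append_getLastD xs hg.1]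
        rw [List.drop_append_of_le_length (by omega)]
      dsimp only
      rw [Prod.mk.injEq]
      refine ⟨?_, ?_⟩
      · rw [List.append_assoc, eb, ea]
      · rw [List.append_assoc, ed, ec]
    · rw [goB, dif_neg hg]
      have hcg : ¬ (0 < xs.length ∧ 0 < ys.length ∧
          xs.getD (xs.length - 1 - 0) 0 > ys.getD 0 0) := by
        intro h
        apply hg
        refine ⟨List.ne_nil_of_length_pos h.1, List.ne_nil_of_length_pos h.2.1, ?_⟩
        rw [← getD_last_eq, ← getD_head_eq]
        exact h.2.2
      rw [countK, dif_neg hcg]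
      simp

-- ===== VERDICT (by name: the statement is the Claim_ definition above) =====
theorem swap_sort_spec : Claim_equal_swap_sort := by
  intro o1 o2 _
  unfold Spec_swap_sort swap_sort swap_sort_alt
  have h := loop_char_fuel o1 o2 o1.length 0 (by omega) (Nat.zero_le _) (Nat.zero_le _)
  simp at h
  rw [h]
  have hg := goB_char o1.length o1 o2 (le_refl _)
  rw [hg]
  dsimp only
  rw [Prod.mk.injEq]
  constructor
  · rfl
  · exact PySem.List.sorted_eq_sorted_of_perm _ _ _ (fun a b h => h)
      ((List.Perm.append (List.reverse_perm _) (List.Perm.refl _)).trans List.perm_append_comm)
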